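-- pv_equiv track=rewrite | github.com/spatiotemporalData2025/MA_Shaoqing | MG_v3.3.py | misra_gries_v3_3
-- ===== SOURCE A (Python) =====
-- def misra_gries_v3_3(stream, k):
--     """
--     Misra-Gries アルゴリズム（バージョン 3.3）の実装。
--     頻出要素を推定するために、最小カウントの要素を置き換える戦略を使用する。
--
--     パラメータ:
--         stream (list): データストリーム（数値など）
--         k (int): 出現頻度が N/k を超える可能性のある要素数の上限
--
--     戻り値:
--         counter (dict): 頻出候補の要素とその推定カウント
--     """
--     counter = {}  # 要素とその出現回数の辞書
--     n = 0         # 処理された要素数（参考用）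
--
--     for elem in stream:
--         n += 1
--
--         if elem in counter:
--             # すでに候補であればカウントを増加
--             counter[elem] += 1
--         elif len(counter) < k:
--             # 候補数がk未満なら新規に追加
--             counter[elem] = 1
--         else:
--             # 最小のカウントを持つ要素を削除し、置き換える
--             min_elem = min(counter, key=counter.get)
--             min_count = counter[min_elem]
--             del counter[min_elem]
--             counter[elem] = min_count + 1
--
--     return counter
-- ===== SOURCE B (Python) =====
-- # B: Misra-Gries / Space-Saving with a hand-written leftist min-heap of
-- # (count, seq, elem) entries plus lazy invalidation, so the evictable minimum
-- # is found by heap pops instead of a full scan of the candidate dict.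
--
-- def _rank(h):
--     return h[3] if h is not None else 0
--
--
-- def _merge(a, b):
--     """Merge two leftist heaps; a node is (count, seq, elem, rank, left, right)."""
--     if a is None:
--         return b
--     if b is None:
--         return a
--     if (b[0], b[1]) < (a[0], a[1]):
--         a, b = b, a
--     m = _merge(a[5], b)
--     l = a[4]
--     if _rank(l) >= _rank(m):
--         return (a[0], a[1], a[2], _rank(m) + 1, l, m)
--     return (a[0], a[1], a[2], _rank(l) + 1, m, l)
--
--
-- def misra_gries_v3_3(stream, k):
--     counter = {}   # elem -> [count, seq]; seq = insertion sequence number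
--     heap = None    # leftist heap of (count, seq, elem); entries go stale lazily
--     next_seq = 0
--     for elem in stream:
--         rec = counter.get(elem)
--         if rec is not None:
--             rec[0] += 1
--             heap = _merge(heap, (rec[0], rec[1], elem, 1, None, None))
--         elif len(counter) < k:
--             counter[elem] = [1, next_seq]
--             heap = _merge(heap, (1, next_seq, elem, 1, None, None))
--             next_seq += 1
--         else:
--             while True:
--                 c, s, e = heap[0], heap[1], heap[2]
--                 heap = _merge(heap[4], heap[5])
--                 cur = counter.get(e)
--                 if cur is not None and cur[0] == c and cur[1] == s:
--                     break
--             del counter[e]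
--             counter[elem] = [c + 1, next_seq]
--             heap = _merge(heap, (c + 1, next_seq, elem, 1, None, None))
--             next_seq += 1
--     return {e: v[0] for e, v in counter.items()}
-- ===== Notes on version B (the rewrite author's own statement) =====
-- stated objective: faster
-- what changed: A rescans the whole candidate dict with min(counter, key=counter.get) on every eviction (O(k) per evicted element); B keeps a leftist min-heap of (count, insertion-seq, elem) entries with lazy invalidation, so the evictable minimum is found by O(log k) amortized heap pops, with the same dict insertion order and tie-breaking (min count, then earliest-inserted).
import Mathlib
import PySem

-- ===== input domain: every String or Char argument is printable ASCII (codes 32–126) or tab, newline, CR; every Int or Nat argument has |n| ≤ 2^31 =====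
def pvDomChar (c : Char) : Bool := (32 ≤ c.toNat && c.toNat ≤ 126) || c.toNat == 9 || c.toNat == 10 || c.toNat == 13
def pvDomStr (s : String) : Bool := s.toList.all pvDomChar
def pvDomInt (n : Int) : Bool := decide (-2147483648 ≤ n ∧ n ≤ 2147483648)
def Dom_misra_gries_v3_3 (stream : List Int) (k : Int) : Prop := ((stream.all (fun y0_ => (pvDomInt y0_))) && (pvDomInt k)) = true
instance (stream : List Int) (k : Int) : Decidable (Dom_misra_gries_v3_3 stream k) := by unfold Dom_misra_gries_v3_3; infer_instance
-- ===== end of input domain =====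

-- B replaces A's per-eviction O(k) scan for the min-count candidate by a leftist
-- min-heap of (count, seq, elem) entries with lazy invalidation (same return value).

-- ===== PORT A =====
-- one iteration of A's `for elem in stream` loop over the dict `counter`
def mgStepA (k : Int) (d : PySem.Dict Int Int) (elem : Int) : PySem.Dict Int Int :=
  if d.contains elem then
    d.insert elem (d.getD elem 0 + 1)
  else if (d.size : Int) < k then
    d.insert elem 1
  else
    match PySem.List.min? d.keys (fun e => d.getD e 0) with
    | none => d          -- Python raises ValueError here (min of empty dict); outside Pre_
    | some m => (d.erase m).insert elem (d.getD m 0 + 1)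

def misra_gries_v3_3 (stream : List Int) (k : Int) : List (Int × Int) :=
  (stream.foldl (mgStepA k) PySem.Dict.empty).items

-- ===== PORT B =====
-- leftist min-heap node: (count, seq, elem, rank, left, right); `nil` is Python's None
inductive MGHeap : Type
  | nil : MGHeap
  | node : Int → Int → Int → Int → MGHeap → MGHeap → MGHeap
deriving Repr, DecidableEq

def MGHeap.rank : MGHeap → Int
  | .nil => 0
  | .node _ _ _ rk _ _ => rk

def MGHeap.size : MGHeap → Nat
  | .nil => 0
  | .node _ _ _ _ l r => l.size + r.size + 1

-- Python's tuple comparison (c, s) < (c', s')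
def mgLexLt (c s c' s' : Int) : Bool := decide (c < c' ∨ (c = c' ∧ s < s'))

-- Source B's _merge (the `a, b = b, a` swap branch is written out).  The recursion is guarded
-- by a fuel argument (size a + size b, enough for every call): a pure totality guard.

-- the tail of Source B's _merge: rebuild a node from root, old left child and merged right
def mgNode (c s e : Int) (l m : MGHeap) : MGHeap :=
  if l.rank ≥ m.rank then .node c s e (m.rank + 1) l m
  else .node c s e (l.rank + 1) m l

def MGHeap.mergeF : Nat → MGHeap → MGHeap → MGHeap
  | _, .nil, b => b
  | _, .node c1 s1 e1 rk1 l1 r1, .nil => .node c1 s1 e1 rk1 l1 r1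
  | 0, a, _ => a         -- fuel exhausted: never reached with fuel = size a + size b
  | n + 1, .node c1 s1 e1 rk1 l1 r1, .node c2 s2 e2 rk2 l2 r2 =>
    if mgLexLt c2 s2 c1 s1 then
      mgNode c2 s2 e2 l2 (MGHeap.mergeF n r2 (.node c1 s1 e1 rk1 l1 r1))
    else
      mgNode c1 s1 e1 l1 (MGHeap.mergeF n r1 (.node c2 s2 e2 rk2 l2 r2))

def MGHeap.merge (a b : MGHeap) : MGHeap := MGHeap.mergeF (a.size + b.size) a b

-- Source B's `while True` pop loop: pop until the entry matches the candidate's current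
-- record; fuel = heap size (enough for every pop), again a pure totality guard
def mgPopF (d : PySem.Dict Int (Int × Int)) : Nat → MGHeap → Option ((Int × Int × Int) × MGHeap)
  | _, .nil => none      -- Python raises TypeError here (unpacking None); outside Pre_
  | 0, _ => none
  | n + 1, .node c s e _ l r =>
    match d.get? e with
    | some cur => if cur.1 = c ∧ cur.2 = s then some ((c, s, e), l.merge r) else mgPopF d n (l.merge r)
    | none => mgPopF d n (l.merge r)

def mgPop (d : PySem.Dict Int (Int × Int)) (h : MGHeap) : Option ((Int × Int × Int) × MGHeap) :=
  mgPopF d h.size h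

-- one iteration of Source B's loop: state = (counter : elem → (count, seq), heap, next_seq)
def mgStepB (k : Int) (st : PySem.Dict Int (Int × Int) × MGHeap × Int) (elem : Int) :
    PySem.Dict Int (Int × Int) × MGHeap × Int :=
  let (d, h, ns) := st
  match d.get? elem with
  | some rec =>
      (d.insert elem (rec.1 + 1, rec.2), h.merge (.node (rec.1 + 1) rec.2 elem 1 .nil .nil), ns)
  | none =>
    if (d.size : Int) < k then
      (d.insert elem (1, ns), h.merge (.node 1 ns elem 1 .nil .nil), ns + 1)
    else
      match mgPop d h with
      | none => (d, h, ns)     -- Python raises here; outside Pre_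
      | some ((c, _, e), h') =>
          ((d.erase e).insert elem (c + 1, ns), h'.merge (.node (c + 1) ns elem 1 .nil .nil), ns + 1)

def misra_gries_v3_3_alt (stream : List Int) (k : Int) : List (Int × Int) :=
  ((stream.foldl (mgStepB k) (PySem.Dict.empty, .nil, 0)).1.items).map (fun p => (p.1, p.2.1))

-- ===== PRECONDITION & SPEC =====
-- Pre_ excludes only the inputs where A raises: a nonempty stream with k ≤ 0 makes A call
-- min() on an empty dict (ValueError).
def Pre_misra_gries_v3_3 (stream : List Int) (k : Int) : Prop := stream = [] ∨ 1 ≤ k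
instance (stream : List Int) (k : Int) : Decidable (Pre_misra_gries_v3_3 stream k) := by
  unfold Pre_misra_gries_v3_3; infer_instance

def pvWitness_misra_gries_v3_3 : List Int × Int := ([1, 2, 1, 3, 2, 4, 1], 2)

def Spec_misra_gries_v3_3 (stream : List Int) (k : Int) (out : List (Int × Int)) : Prop :=
  out = misra_gries_v3_3_alt stream k
instance (stream : List Int) (k : Int) (out : List (Int × Int)) : Decidable (Spec_misra_gries_v3_3 stream k out) := by
  unfold Spec_misra_gries_v3_3; infer_instance

-- ===== CLAIM (what is proved, stated in full; the proofs are below) =====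
def Claim_equal_misra_gries_v3_3 : Prop := ∀ (stream : List Int) (k : Int), Dom_misra_gries_v3_3 stream k → Pre_misra_gries_v3_3 stream k → Spec_misra_gries_v3_3 stream k (misra_gries_v3_3 stream k)


-- ===== LEMMAS AND PROOFS =====

-- lexicographic order on (count, seq), as a Prop
def mgLexLe (c s c' s' : Int) : Prop := c < c' ∨ (c = c' ∧ s ≤ s')

-- multiset of heap entries
def MGHeap.toMul : MGHeap → Multiset (Int × Int × Int)
  | .nil => 0
  | .node c s e _ l r => (c, s, e) ::ₘ (l.toMul + r.toMul)

-- heap order property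
def MGHeap.IsHeap : MGHeap → Prop
  | .nil => True
  | .node c s _ _ l r =>
      (∀ x ∈ l.toMul + r.toMul, mgLexLe c s x.1 x.2.1) ∧ l.IsHeap ∧ r.IsHeap

theorem mgLexLe_trans {a b c d e f : Int} (h1 : mgLexLe a b c d) (h2 : mgLexLe c d e f) :
    mgLexLe a b e f := by unfold mgLexLe at *; omega

theorem mgLexLt_le {c s c' s' : Int} (h : mgLexLt c s c' s' = true) : mgLexLe c s c' s' := by
  simp [mgLexLt] at h; unfold mgLexLe; omega

theorem mgLexLt_false_le {c s c' s' : Int} (h : mgLexLt c s c' s' = false) : mgLexLe c' s' c s := by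
  simp [mgLexLt] at h; unfold mgLexLe; omega

theorem mgToMul_mgNode (c s e : Int) (l m : MGHeap) :
    (mgNode c s e l m).toMul = (c, s, e) ::ₘ (l.toMul + m.toMul) := by
  unfold mgNode; split <;> simp [MGHeap.toMul] <;> exact Multiset.add_comm _ _

theorem mgIsHeap_mgNode {c s : Int} (e : Int) {l m : MGHeap}
    (hle : ∀ x ∈ l.toMul + m.toMul, mgLexLe c s x.1 x.2.1)
    (hl : l.IsHeap) (hm : m.IsHeap) : (mgNode c s e l m).IsHeap := by
  unfold mgNode; split
  · exact ⟨hle, hl, hm⟩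
  · refine ⟨?_, hm, hl⟩
    intro x hx
    exact hle x (by rwa [Multiset.add_comm] at hx)

theorem mgSize_mgNode (c s e : Int) (l m : MGHeap) :
    (mgNode c s e l m).size = l.size + m.size + 1 := by
  unfold mgNode; split <;> simp [MGHeap.size] <;> omega

theorem mgSizeF : ∀ (n : Nat) (a b : MGHeap), a.size + b.size ≤ n →
    (MGHeap.mergeF n a b).size = a.size + b.size := by
  intro n
  induction n with
  | zero =>
    intro a b hle
    cases a with
    | nil => simp [MGHeap.mergeF, MGHeap.size]
    | node c1 s1 e1 rk1 l1 r1 =>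
      cases b with
      | nil => simp [MGHeap.mergeF, MGHeap.size]
      | node c2 s2 e2 rk2 l2 r2 => simp [MGHeap.size] at hle
  | succ n ih =>
    intro a b hle
    cases a with
    | nil => simp [MGHeap.mergeF, MGHeap.size]
    | node c1 s1 e1 rk1 l1 r1 =>
      cases b with
      | nil => simp [MGHeap.mergeF, MGHeap.size]
      | node c2 s2 e2 rk2 l2 r2 =>
        simp only [MGHeap.size] at hle ⊢
        rw [MGHeap.mergeF]
        split
        · rw [mgSize_mgNode, ih r2 (.node c1 s1 e1 rk1 l1 r1) (by simp [MGHeap.size]; omega)]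
          simp [MGHeap.size]; omega
        · rw [mgSize_mgNode, ih r1 (.node c2 s2 e2 rk2 l2 r2) (by simp [MGHeap.size]; omega)]
          simp [MGHeap.size]; omega

theorem mgSize_merge (a b : MGHeap) : (a.merge b).size = a.size + b.size :=
  mgSizeF (a.size + b.size) a b le_rfl

theorem mgToMulF : ∀ (n : Nat) (a b : MGHeap), a.size + b.size ≤ n →
    (MGHeap.mergeF n a b).toMul = a.toMul + b.toMul := by
  intro n
  induction n with
  | zero =>
    intro a b hle
    cases a with
    | nil => simp [MGHeap.mergeF, MGHeap.toMul]
    | node c1 s1 e1 rk1 l1 r1 =>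
      cases b with
      | nil => simp [MGHeap.mergeF, MGHeap.toMul]
      | node c2 s2 e2 rk2 l2 r2 => simp [MGHeap.size] at hle
  | succ n ih =>
    intro a b hle
    cases a with
    | nil => simp [MGHeap.mergeF, MGHeap.toMul]
    | node c1 s1 e1 rk1 l1 r1 =>
      cases b with
      | nil => simp [MGHeap.mergeF, MGHeap.toMul]
      | node c2 s2 e2 rk2 l2 r2 =>
        simp only [MGHeap.size] at hle
        rw [MGHeap.mergeF]
        split
        · rw [mgToMul_mgNode, ih r2 (.node c1 s1 e1 rk1 l1 r1) (by simp [MGHeap.size]; omega)]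
          simp only [MGHeap.toMul, ← Multiset.singleton_add]
          abel
        · rw [mgToMul_mgNode, ih r1 (.node c2 s2 e2 rk2 l2 r2) (by simp [MGHeap.size]; omega)]
          simp only [MGHeap.toMul, ← Multiset.singleton_add]
          abel

theorem mgToMul_merge (a b : MGHeap) : (a.merge b).toMul = a.toMul + b.toMul :=
  mgToMulF (a.size + b.size) a b le_rfl

theorem mgRoot_min {c s e rk : Int} {l r : MGHeap}
    (h : (MGHeap.node c s e rk l r).IsHeap) :
    ∀ x ∈ (MGHeap.node c s e rk l r).toMul, mgLexLe c s x.1 x.2.1 := by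
  intro x hx
  simp [MGHeap.toMul] at hx
  rcases hx with rfl | hx
  · exact Or.inr ⟨rfl, le_refl _⟩
  · exact h.1 x (by simpa using hx)

theorem mgIsHeapF : ∀ (n : Nat) (a b : MGHeap), a.size + b.size ≤ n →
    a.IsHeap → b.IsHeap → (MGHeap.mergeF n a b).IsHeap := by
  intro n
  induction n with
  | zero =>
    intro a b hle ha hb
    cases a with
    | nil => simpa [MGHeap.mergeF] using hb
    | node c1 s1 e1 rk1 l1 r1 =>
      cases b with
      | nil => simpa [MGHeap.mergeF] using ha
      | node c2 s2 e2 rk2 l2 r2 => simp [MGHeap.size] at hle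
  | succ n ih =>
    intro a b hle ha hb
    cases a with
    | nil => simpa [MGHeap.mergeF] using hb
    | node c1 s1 e1 rk1 l1 r1 =>
      cases b with
      | nil => simpa [MGHeap.mergeF] using ha
      | node c2 s2 e2 rk2 l2 r2 =>
        simp only [MGHeap.size] at hle
        rw [MGHeap.mergeF]
        split
        · rename_i hlt
          refine mgIsHeap_mgNode _ ?_ hb.2.1
            (ih r2 (.node c1 s1 e1 rk1 l1 r1) (by simp [MGHeap.size]; omega) hb.2.2 ha)
          intro x hx
          rw [Multiset.mem_add] at hx
          rcases hx with hx | hx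
          · exact hb.1 x (Multiset.mem_add.mpr (Or.inl hx))
          · rw [mgToMulF n _ _ (by simp [MGHeap.size]; omega), Multiset.mem_add] at hx
            rcases hx with hx | hx
            · exact hb.1 x (Multiset.mem_add.mpr (Or.inr hx))
            · exact mgLexLe_trans (mgLexLt_le hlt) (mgRoot_min ha x hx)
        · rename_i hlt
          refine mgIsHeap_mgNode _ ?_ ha.2.1
            (ih r1 (.node c2 s2 e2 rk2 l2 r2) (by simp [MGHeap.size]; omega) ha.2.2 hb)
          intro x hx
          rw [Multiset.mem_add] at hx
          rcases hx with hx | hx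
          · exact ha.1 x (Multiset.mem_add.mpr (Or.inl hx))
          · rw [mgToMulF n _ _ (by simp [MGHeap.size]; omega), Multiset.mem_add] at hx
            rcases hx with hx | hx
            · exact ha.1 x (Multiset.mem_add.mpr (Or.inr hx))
            · exact mgLexLe_trans (mgLexLt_false_le (by simpa using hlt)) (mgRoot_min hb x hx)

theorem mgIsHeap_merge {a b : MGHeap} (ha : a.IsHeap) (hb : b.IsHeap) : (a.merge b).IsHeap :=
  mgIsHeapF (a.size + b.size) a b le_rfl ha hb

-- the pop loop returns the current record of least (count, seq) among the dict's records
theorem mgPopF_spec (d : PySem.Dict Int (Int × Int)) (hnd : d.keys.Nodup) (hne : d.items ≠ []) :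
    ∀ (n : Nat) (h : MGHeap), h.size ≤ n → h.IsHeap →
      (∀ p ∈ d.items, (p.2.1, p.2.2, p.1) ∈ h.toMul) →
      ∃ c s e h', mgPopF d n h = some ((c, s, e), h') ∧ d.get? e = some (c, s) ∧
        (∀ p ∈ d.items, mgLexLe c s p.2.1 p.2.2) ∧ h'.IsHeap ∧
        (∀ p ∈ d.items, p.1 ≠ e → (p.2.1, p.2.2, p.1) ∈ h'.toMul) := by
  intro n
  induction n with
  | zero =>
    intro h hsz _ hrec
    rcases List.exists_mem_of_ne_nil _ hne with ⟨p, hp⟩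
    cases h with
    | nil => exact absurd (hrec p hp) (by simp [MGHeap.toMul])
    | node c s e rk l r => simp [MGHeap.size] at hsz
  | succ n ih =>
    intro h hsz hH hrec
    cases h with
    | nil =>
      rcases List.exists_mem_of_ne_nil _ hne with ⟨p, hp⟩
      exact absurd (hrec p hp) (by simp [MGHeap.toMul])
    | node c s e rk l r =>
      have hsz' : (l.merge r).size ≤ n := by
        rw [mgSize_merge]
        simp [MGHeap.size] at hsz
        omega
      cases hget : d.get? e with
      | some cur =>
        by_cases hcond : cur.1 = c ∧ cur.2 = s
        · refine ⟨c, s, e, l.merge r, ?_, ?_, ?_, mgIsHeap_merge hH.2.1 hH.2.2, ?_⟩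
          · simp [mgPopF, hget, hcond]
          · rw [hget]; cases cur; simp at hcond; simp [hcond]
          · intro p hp
            exact mgRoot_min hH _ (hrec p hp)
          · intro p hp hne'
            have := hrec p hp
            simp only [MGHeap.toMul, Multiset.mem_cons] at this
            rcases this with heq | hmem
            · exact absurd (congrArg (fun q => q.2.2) heq) (by simpa using hne')
            · rwa [mgToMul_merge]
        · have hstep : ∀ p ∈ d.items, (p.2.1, p.2.2, p.1) ∈ (l.merge r).toMul := by
            rintro ⟨p1, p2⟩ hp
            have := hrec _ hp
            simp only [MGHeap.toMul, Multiset.mem_cons] at this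
            rcases this with heq | hmem
            · exfalso
              have h1 : p2.1 = c := congrArg (fun q => q.1) heq
              have h2 : p2.2 = s := congrArg (fun q => q.2.1) heq
              have h3 : p1 = e := congrArg (fun q => q.2.2) heq
              have hg : d.get? p1 = some p2 := PySem.Dict.get?_of_mem_items d hp hnd
              rw [h3, hget] at hg
              cases hg
              exact hcond ⟨h1, h2⟩
            · rwa [mgToMul_merge]
          rcases ih (l.merge r) hsz' (mgIsHeap_merge hH.2.1 hH.2.2) hstep with
            ⟨c', s', e', h', hpop, rest⟩
          refine ⟨c', s', e', h', ?_, rest⟩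
          simpa [mgPopF, hget, hcond] using hpop
      | none =>
        have hstep : ∀ p ∈ d.items, (p.2.1, p.2.2, p.1) ∈ (l.merge r).toMul := by
          rintro ⟨p1, p2⟩ hp
          have := hrec _ hp
          simp only [MGHeap.toMul, Multiset.mem_cons] at this
          rcases this with heq | hmem
          · exfalso
            have h3 : p1 = e := congrArg (fun q => q.2.2) heq
            have hg : d.get? p1 = some p2 := PySem.Dict.get?_of_mem_items d hp hnd
            rw [h3, hget] at hg
            cases hg
          · rwa [mgToMul_merge]
        rcases ih (l.merge r) hsz' (mgIsHeap_merge hH.2.1 hH.2.2) hstep with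
          ⟨c', s', e', h', hpop, rest⟩
        refine ⟨c', s', e', h', ?_, rest⟩
        simpa [mgPopF, hget] using hpop

theorem mgPop_spec (d : PySem.Dict Int (Int × Int)) (h : MGHeap)
    (hH : h.IsHeap) (hnd : d.keys.Nodup)
    (hrec : ∀ p ∈ d.items, (p.2.1, p.2.2, p.1) ∈ h.toMul)
    (hne : d.items ≠ []) :
    ∃ c s e h', mgPop d h = some ((c, s, e), h') ∧ d.get? e = some (c, s) ∧
      (∀ p ∈ d.items, mgLexLe c s p.2.1 p.2.2) ∧ h'.IsHeap ∧
      (∀ p ∈ d.items, p.1 ≠ e → (p.2.1, p.2.2, p.1) ∈ h'.toMul) :=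
  mgPopF_spec d hnd hne h.size h le_rfl hH hrec

-- ===== A's min(counter, key=counter.get): characterisation of PySem.List.min? =====

theorem minFold_skip (f : Option Int → Int → Option Int) (g : Int → Int)
    (hf : ∀ a x, f (some a) x = if g x < g a then some x else some a)
    (m : Int) (t : List Int) (h : ∀ y ∈ t, ¬ (g y < g m)) :
    t.foldl f (some m) = some m := by
  induction t with
  | nil => rfl
  | cons y t ih =>
    simp only [List.foldl_cons, hf]
    rw [if_neg (h y List.mem_cons_self)]
    exact ih (fun z hz => h z (List.mem_cons_of_mem _ hz))

theorem minFold_enter (f : Option Int → Int → Option Int) (g : Int → Int)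
    (hf0 : ∀ x, f none x = some x)
    (hf : ∀ a x, f (some a) x = if g x < g a then some x else some a)
    (m : Int) (t1 t2 : List Int) (acc : Option Int)
    (hacc : ∀ a, acc = some a → g m < g a) (h1 : ∀ y ∈ t1, g m < g y)
    (h2 : ∀ y ∈ t2, ¬ (g y < g m)) :
    (t1 ++ m :: t2).foldl f acc = some m := by
  induction t1 generalizing acc with
  | nil =>
    simp only [List.nil_append, List.foldl_cons]
    cases acc with
    | none =>
      rw [hf0]
      exact minFold_skip f g hf m t2 h2
    | some a =>
      rw [hf, if_pos (hacc a rfl)]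
      exact minFold_skip f g hf m t2 h2
  | cons y t1 ih =>
    simp only [List.cons_append, List.foldl_cons]
    have h1' : ∀ z ∈ t1, g m < g z := fun z hz => h1 z (List.mem_cons_of_mem _ hz)
    cases acc with
    | none =>
      rw [hf0]
      exact ih _ (fun a ha => by cases ha; exact h1 y List.mem_cons_self) h1'
    | some a =>
      rw [hf]
      split
      · exact ih _ (fun b hb => by cases hb; exact h1 y List.mem_cons_self) h1'
      · exact ih _ (fun b hb => by cases hb; exact hacc a rfl) h1'

theorem min?_split (g : Int → Int) (m : Int) (t1 t2 : List Int)
    (h1 : ∀ y ∈ t1, g m < g y) (h2 : ∀ y ∈ t2, g m ≤ g y) :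
    PySem.List.min? (t1 ++ m :: t2) g = some m := by
  unfold PySem.List.min?
  exact minFold_enter _ g (fun _ => rfl) (fun _ _ => rfl) m t1 t2 none (by simp) h1
    (fun y hy => not_lt.mpr (h2 y hy))

-- ===== the coupling invariant between A's state and B's state =====

def mgProj (p : Int × (Int × Int)) : Int × Int := (p.1, p.2.1)

def MGInv (dA : PySem.Dict Int Int) (dB : PySem.Dict Int (Int × Int)) (h : MGHeap) (ns : Int) : Prop :=
  dA.items = dB.items.map mgProj ∧
  (dB.items.map (fun p => p.2.2)).Pairwise (· < ·) ∧
  (∀ p ∈ dB.items, p.2.2 < ns) ∧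
  (∀ p ∈ dB.items, (p.2.1, p.2.2, p.1) ∈ h.toMul) ∧
  h.IsHeap ∧
  dB.keys.Nodup

theorem mgProj_get? (dA : PySem.Dict Int Int) (dB : PySem.Dict Int (Int × Int))
    (hproj : dA.items = dB.items.map mgProj) (x : Int) :
    dA.get? x = (dB.get? x).map (fun v => v.1) := by
  simp only [PySem.Dict.get?, hproj, List.find?_map, Option.map_map]
  rfl


theorem mgProj_keys (dA : PySem.Dict Int Int) (dB : PySem.Dict Int (Int × Int))
    (hproj : dA.items = dB.items.map mgProj) : dA.keys = dB.keys := by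
  simp only [PySem.Dict.keys, hproj, List.map_map]
  rfl

theorem mgContains_iff (dA : PySem.Dict Int Int) (dB : PySem.Dict Int (Int × Int))
    (hproj : dA.items = dB.items.map mgProj) (x : Int) :
    dA.contains x = dB.contains x := by
  simp only [PySem.Dict.contains, hproj, List.any_map]
  rfl

theorem mgContains_erase_false {ν : Type} (d : PySem.Dict Int ν) (x y : Int)
    (h : d.contains x = false) : (d.erase y).contains x = false := by
  simp only [PySem.Dict.contains, PySem.Dict.erase, List.any_eq_false] at *
  intro p hp
  exact h p (List.mem_of_mem_filter hp)

-- a singleton heap node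
theorem mgIsHeap_single (c s e : Int) : (MGHeap.node c s e 1 .nil .nil).IsHeap := by
  refine ⟨?_, trivial, trivial⟩
  intro x hx
  simp [MGHeap.toMul] at hx

theorem mgToMul_single (c s e : Int) :
    (MGHeap.node c s e 1 MGHeap.nil MGHeap.nil).toMul = {(c, s, e)} := by
  simp [MGHeap.toMul]

theorem mgStep_inv (k elem : Int) (hk : 1 ≤ k)
    (dA : PySem.Dict Int Int) (dB : PySem.Dict Int (Int × Int)) (h : MGHeap) (ns : Int)
    (hInv : MGInv dA dB h ns) :
    MGInv (mgStepA k dA elem) (mgStepB k (dB, h, ns) elem).1 (mgStepB k (dB, h, ns) elem).2.1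
      (mgStepB k (dB, h, ns) elem).2.2 := by
  obtain ⟨hproj, hpair, hbound, hrec, hheap, hnd⟩ := hInv
  have hndA : dA.keys.Nodup := by rw [mgProj_keys dA dB hproj]; exact hnd
  unfold mgStepA mgStepB
  cases hB : dB.get? elem with
  | some rec =>
    -- increment branch
    have hcB : dB.contains elem = true := by
      rw [PySem.Dict.contains_eq_isSome_get?, hB]; rfl
    have hcA : dA.contains elem = true := by rw [mgContains_iff dA dB hproj]; exact hcB
    have hgA : dA.getD elem 0 = rec.1 := by
      rw [PySem.Dict.getD_eq_get?_getD, mgProj_get? dA dB hproj, hB]; rfl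
    have hmemE : (elem, rec) ∈ dB.items := PySem.Dict.mem_items_of_get?_eq_some dB hB
    have huniq : ∀ p ∈ dB.items, p.1 = elem → p.2 = rec := by
      rintro ⟨p1, p2⟩ hp h1
      have h1' : p1 = elem := h1
      subst h1'
      have hg : dB.get? p1 = some p2 := PySem.Dict.get?_of_mem_items dB hp hnd
      rw [hB] at hg
      exact (Option.some.injEq _ _).mp hg.symm
    simp only [hB, if_pos hcA, hgA]
    have hitA := PySem.Dict.items_insert_of_contains dA (rec.1 + 1) hcA
    have hitB := PySem.Dict.items_insert_of_contains dB (rec.1 + 1, rec.2) hcB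
    refine ⟨?_, ?_, ?_, ?_, mgIsHeap_merge hheap (mgIsHeap_single _ _ _), PySem.Dict.nodup_keys_insert dB elem _ hnd⟩
    · rw [hitA, hitB, hproj, List.map_map, List.map_map]
      refine List.map_congr_left ?_
      rintro ⟨p1, p2⟩ hp
      by_cases hpe : p1 = elem <;> simp [mgProj, hpe]
    · rw [hitB, List.map_map]
      have : ∀ p ∈ dB.items,
          ((fun q => q.2.2) ∘ (fun p => if (p.1 == elem) = true then (elem, (rec.1 + 1, rec.2)) else p)) p
          = (fun q => q.2.2) p := by
        rintro ⟨p1, p2⟩ hp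
        by_cases hpe : p1 = elem
        · simp [hpe]
          exact (congrArg (fun v => v.2) (huniq (p1, p2) hp hpe)).symm
        · simp [hpe]
      rw [List.map_congr_left this]
      exact hpair
    · rw [hitB]
      rintro p hp
      rcases List.mem_map.mp hp with ⟨q, hq, rfl⟩
      by_cases hqe : q.1 = elem
      · simpa [hqe] using hbound (elem, rec) hmemE
      · simpa [hqe] using hbound q hq
    · rw [hitB]
      rintro p hp
      rcases List.mem_map.mp hp with ⟨q, hq, rfl⟩
      rw [mgToMul_merge, Multiset.mem_add]
      by_cases hqe : q.1 = elem
      · right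
        have := huniq q hq hqe
        simp [hqe, mgToMul_single]
      · left
        simp [hqe]
        exact hrec q hq
  | none =>
    have hcB : dB.contains elem = false := by
      rw [PySem.Dict.contains_eq_isSome_get?, hB]; rfl
    have hcA : dA.contains elem = false := by rw [mgContains_iff dA dB hproj]; exact hcB
    have hsz : (dA.size : Int) = (dB.size : Int) := by
      simp [PySem.Dict.size, hproj]
    simp only [hB, if_neg (by simp [hcA] : ¬ dA.contains elem = true), hsz]
    by_cases hlt : (dB.size : Int) < k
    · -- fresh insert branch
      simp only [if_pos hlt]
      have hitA := PySem.Dict.items_insert_of_not_contains dA (1 : Int) hcA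
      have hitB := PySem.Dict.items_insert_of_not_contains dB ((1 : Int), ns) hcB
      refine ⟨?_, ?_, ?_, ?_, mgIsHeap_merge hheap (mgIsHeap_single _ _ _), PySem.Dict.nodup_keys_insert dB elem _ hnd⟩
      · rw [hitA, hitB, hproj]
        simp [mgProj]
      · rw [hitB, List.map_append]
        refine List.pairwise_append.mpr ⟨hpair, by simp, ?_⟩
        intro a ha b hb
        simp at hb
        rcases List.mem_map.mp ha with ⟨q, hq, rfl⟩
        rw [hb]
        exact hbound q hq
      · rw [hitB]
        intro p hp
        rcases List.mem_append.mp hp with hp | hp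
        · exact lt_trans (hbound p hp) (by omega)
        · simp at hp
          rw [hp]
          exact lt_add_one ns
      · rw [hitB]
        intro p hp
        rw [mgToMul_merge, Multiset.mem_add]
        rcases List.mem_append.mp hp with hp | hp
        · exact Or.inl (hrec p hp)
        · simp at hp
          right
          rw [hp, mgToMul_single]
          simp
    · -- eviction branch
      simp only [if_neg hlt]
      have hne : dB.items ≠ [] := by
        have : (1 : Int) ≤ (dB.size : Int) := le_trans hk (not_lt.mp hlt)
        intro hemp
        simp [PySem.Dict.size, hemp] at this
      rcases mgPop_spec dB h hheap hnd hrec hne with ⟨c, s, e, h', hpop, hget, hmin, hH', hkeep⟩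
      have hmemE : (e, (c, s)) ∈ dB.items := PySem.Dict.mem_items_of_get?_eq_some dB hget
      rcases List.append_of_mem hmemE with ⟨t1, t2, hsplit⟩
      -- A's min over the dict equals the popped record
      have hgmem : ∀ p ∈ dB.items, dA.getD p.1 0 = p.2.1 := by
        rintro ⟨p1, p2⟩ hp
        refine PySem.Dict.getD_of_mem_items dA ?_ hndA 0
        rw [hproj]
        exact List.mem_map.mpr ⟨(p1, p2), hp, rfl⟩
      have hge : dA.getD e 0 = c := hgmem (e, (c, s)) hmemE
      have hlt1 : ∀ p ∈ t1, p.2.2 < s := by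
        intro p hp
        have := hpair
        rw [hsplit, List.map_append, List.pairwise_append] at this
        exact this.2.2 _ (List.mem_map.mpr ⟨p, hp, rfl⟩) s (by simp)
      have hkeysplit : dA.keys = t1.map (fun p => p.1) ++ e :: t2.map (fun p => p.1) := by
        rw [mgProj_keys dA dB hproj, PySem.Dict.keys, hsplit]
        simp
      have hminA : PySem.List.min? dA.keys (fun x => dA.getD x 0) = some e := by
        rw [hkeysplit]
        refine min?_split _ e _ _ ?_ ?_
        · intro y hy
          rcases List.mem_map.mp hy with ⟨p, hp, rfl⟩
          rw [hge, hgmem p (by rw [hsplit]; exact List.mem_append_left _ hp)]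
          have h1 := hmin p (by rw [hsplit]; exact List.mem_append_left _ hp)
          have h2 := hlt1 p hp
          unfold mgLexLe at h1
          omega
        · intro y hy
          rcases List.mem_map.mp hy with ⟨p, hp, rfl⟩
          rw [hge, hgmem p (by rw [hsplit]; exact List.mem_append_right _ (List.mem_cons_of_mem _ hp))]
          have h1 := hmin p (by rw [hsplit]; exact List.mem_append_right _ (List.mem_cons_of_mem _ hp))
          unfold mgLexLe at h1
          omega
      simp only [hminA, hpop, hge]
      -- now both sides erase `e` and append `elem`
      have hcA' : (dA.erase e).contains elem = false := mgContains_erase_false dA elem e hcA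
      have hcB' : (dB.erase e).contains elem = false := mgContains_erase_false dB elem e hcB
      have hitA := PySem.Dict.items_insert_of_not_contains (dA.erase e) (c + 1) hcA'
      have hitB := PySem.Dict.items_insert_of_not_contains (dB.erase e) (c + 1, ns) hcB'
      have heraseB : (dB.erase e).items = dB.items.filter (fun p => !(p.1 == e)) := rfl
      have heraseA : (dA.erase e).items = dA.items.filter (fun p => !(p.1 == e)) := rfl
      have hfilter_mem : ∀ p ∈ dB.items.filter (fun p => !(p.1 == e)), p ∈ dB.items ∧ p.1 ≠ e := by
        intro p hp
        have h1 := List.mem_of_mem_filter hp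
        have h2 := List.of_mem_filter hp
        simp at h2
        exact ⟨h1, h2⟩
      have hndB' : (dB.erase e).keys.Nodup := by
        rw [PySem.Dict.keys, heraseB]
        have hsub : ((dB.items.filter (fun p => !(p.1 == e))).map (fun p => p.1)).Sublist
            (dB.items.map (fun p => p.1)) :=
          List.Sublist.map _ (List.filter_sublist)
        exact hnd.sublist hsub
      refine ⟨?_, ?_, ?_, ?_, mgIsHeap_merge hH' (mgIsHeap_single _ _ _), PySem.Dict.nodup_keys_insert _ elem _ hndB'⟩
      · rw [hitA, hitB, heraseA, heraseB, hproj, List.filter_map]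
        rw [show List.filter ((fun (p : Int × Int) => !(p.1 == e)) ∘ mgProj) dB.items
              = List.filter (fun p => !(p.1 == e)) dB.items from List.filter_congr (fun a _ => rfl)]
        simp [mgProj]
      · rw [hitB, heraseB, List.map_append]
        refine List.pairwise_append.mpr ⟨?_, by simp, ?_⟩
        · exact hpair.sublist (List.Sublist.map _ (List.filter_sublist))
        · intro a ha b hb
          simp at hb
          rcases List.mem_map.mp ha with ⟨q, hq, rfl⟩
          rw [hb]
          exact hbound q (hfilter_mem q hq).1
      · rw [hitB, heraseB]
        intro p hp
        rcases List.mem_append.mp hp with hp | hp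
        · exact lt_trans (hbound p (hfilter_mem p hp).1) (by omega)
        · simp at hp
          rw [hp]
          exact lt_add_one ns
      · rw [hitB, heraseB]
        intro p hp
        rw [mgToMul_merge, Multiset.mem_add]
        rcases List.mem_append.mp hp with hp | hp
        · exact Or.inl (hkeep p (hfilter_mem p hp).1 (hfilter_mem p hp).2)
        · simp at hp
          right
          rw [hp, mgToMul_single]
          simp

theorem mgFold_inv (k : Int) (hk : 1 ≤ k) (stream : List Int)
    (dA : PySem.Dict Int Int) (dB : PySem.Dict Int (Int × Int)) (h : MGHeap) (ns : Int)
    (hInv : MGInv dA dB h ns) :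
    MGInv (stream.foldl (mgStepA k) dA)
      ((stream.foldl (mgStepB k) (dB, h, ns)).1)
      ((stream.foldl (mgStepB k) (dB, h, ns)).2.1)
      ((stream.foldl (mgStepB k) (dB, h, ns)).2.2) := by
  induction stream generalizing dA dB h ns with
  | nil => exact hInv
  | cons x t ih =>
    simp only [List.foldl_cons]
    have := mgStep_inv k x hk dA dB h ns hInv
    rcases hst : mgStepB k (dB, h, ns) x with ⟨dB', h', ns'⟩
    rw [hst] at this
    exact ih _ _ _ _ this

-- ===== VERDICT (by name: the statement is the Claim_ definition above) =====
theorem misra_gries_v3_3_spec : Claim_equal_misra_gries_v3_3 := by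
  intro stream k _hdom hpre
  unfold Spec_misra_gries_v3_3 misra_gries_v3_3 misra_gries_v3_3_alt
  rcases hpre with rfl | hk
  · rfl
  · have h0 : MGInv PySem.Dict.empty PySem.Dict.empty .nil 0 := by
      refine ⟨rfl, ?_, ?_, ?_, trivial, ?_⟩ <;> simp [PySem.Dict.empty, PySem.Dict.keys]
    have := mgFold_inv k hk stream PySem.Dict.empty PySem.Dict.empty .nil 0 h0
    rw [this.1]
    rfl
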